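-- pv_equiv track=rewrite | github.com/cchen-cc/MA-SAM | MA-SAM/datasets/dataset_bbox.py | transform_bounding_box
-- ===== SOURCE A (Python) =====
-- def transform_bounding_box(bbox, shape, k, axis):
--     """
--     Transforms the bounding box coordinates based on the rotation and flip operations.
--     bbox: tuple (x_min, y_min, x_max, y_max)
--     shape: tuple (height, width) of the image/label
--     k: number of 90-degree rotations
--     axis: axis along which to flip (0 for vertical, 1 for horizontal)
--     """
--     x_min, y_min, x_max, y_max = bbox
--     height, width = shape
--
--     # Apply rotation
--     for _ in range(k):
--         x_min, y_min, x_max, y_max = y_min, width - x_max, y_max, width - x_min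
--         height, width = width, height  # Swap height and width for the next iteration
--
--     # Apply flip
--     if axis == 0:
--         y_min, y_max = height - y_max, height - y_min
--     elif axis == 1:
--         x_min, x_max = width - x_max, width - x_min
--
--     return x_min, y_min, x_max, y_max
-- ===== SOURCE B (Python) =====
-- def transform_bounding_box(bbox, shape, k, axis):
--     x_min, y_min, x_max, y_max = bbox
--     h, w = shape
--     r = k % 4 if k > 0 else 0
--     if r == 0:
--         x0, y0, x1, y1 = x_min, y_min, x_max, y_max
--     elif r == 1:
--         x0, y0, x1, y1 = y_min, w - x_max, y_max, w - x_min
--     elif r == 2: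
--         x0, y0, x1, y1 = w - x_max, h - y_max, w - x_min, h - y_min
--     else:
--         x0, y0, x1, y1 = h - y_max, x_min, h - y_min, x_max
--     H, W = (h, w) if r % 2 == 0 else (w, h)
--     if axis == 0:
--         y0, y1 = H - y1, H - y0
--     elif axis == 1:
--         x0, x1 = W - x1, W - x0
--     return x0, y0, x1, y1
-- ===== Notes on version B (the rewrite author's own statement) =====
-- stated objective: faster
-- what changed: Replaced the k-iteration rotation loop with a constant-time dispatch on r = k % 4 (r = 0 for non-positive k) using closed-form coordinate formulas for 0/1/2/3 quarter-turns, tracking the height/width swap by the parity of r.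
import Mathlib
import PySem

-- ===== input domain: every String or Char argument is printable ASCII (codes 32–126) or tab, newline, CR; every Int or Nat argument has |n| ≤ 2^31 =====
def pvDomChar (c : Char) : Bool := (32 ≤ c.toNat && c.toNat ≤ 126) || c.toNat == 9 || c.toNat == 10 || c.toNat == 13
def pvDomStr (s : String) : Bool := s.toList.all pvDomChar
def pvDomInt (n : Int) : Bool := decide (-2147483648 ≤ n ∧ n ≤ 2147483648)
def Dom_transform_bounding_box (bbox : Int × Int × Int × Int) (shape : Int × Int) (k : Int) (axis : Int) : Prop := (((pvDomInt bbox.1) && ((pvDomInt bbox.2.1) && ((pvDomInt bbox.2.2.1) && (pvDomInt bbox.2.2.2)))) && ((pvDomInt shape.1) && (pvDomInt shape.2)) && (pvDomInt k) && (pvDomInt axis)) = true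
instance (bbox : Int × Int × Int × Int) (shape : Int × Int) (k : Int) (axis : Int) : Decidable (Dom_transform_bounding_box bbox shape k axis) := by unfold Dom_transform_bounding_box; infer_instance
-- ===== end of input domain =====

-- B replaces A's k-step rotation loop by a constant-time dispatch on k % 4 (no rotation for k ≤ 0): faster.

-- ===== PORT A =====
-- one loop iteration: rotate the bbox a quarter turn and swap height/width
def tbbStep (s : (Int × Int × Int × Int) × Int × Int) : (Int × Int × Int × Int) × Int × Int :=
  ((s.1.2.1, s.2.2 - s.1.2.2.1, s.1.2.2.2, s.2.2 - s.1.1), s.2.2, s.2.1)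

-- `for _ in range(k)` : apply tbbStep k times (empty for k ≤ 0)
def tbbLoop : Nat → (Int × Int × Int × Int) × Int × Int → (Int × Int × Int × Int) × Int × Int
  | 0, s => s
  | n + 1, s => tbbLoop n (tbbStep s)

def transform_bounding_box (bbox : Int × Int × Int × Int) (shape : Int × Int) (k : Int) (axis : Int) : Int × Int × Int × Int :=
  let s := tbbLoop k.toNat (bbox, shape.1, shape.2)
  let (x_min, y_min, x_max, y_max) := s.1
  let height := s.2.1
  let width := s.2.2
  if axis = 0 then (x_min, height - y_max, x_max, height - y_min)
  else if axis = 1 then (width - x_max, y_min, width - x_min, y_max)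
  else (x_min, y_min, x_max, y_max)

-- ===== PORT B =====
def transform_bounding_box_alt (bbox : Int × Int × Int × Int) (shape : Int × Int) (k : Int) (axis : Int) : Int × Int × Int × Int :=
  let (x_min, y_min, x_max, y_max) := bbox
  let h := shape.1
  let w := shape.2
  let r : Int := if k > 0 then k % 4 else 0
  let b : Int × Int × Int × Int :=
    if r = 0 then (x_min, y_min, x_max, y_max)
    else if r = 1 then (y_min, w - x_max, y_max, w - x_min)
    else if r = 2 then (w - x_max, h - y_max, w - x_min, h - y_min)
    else (h - y_max, x_min, h - y_min, x_max)
  let H := if r % 2 = 0 then h else w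
  let W := if r % 2 = 0 then w else h
  if axis = 0 then (b.1, H - b.2.2.2, b.2.2.1, H - b.2.1)
  else if axis = 1 then (W - b.2.2.1, b.2.1, W - b.1, b.2.2.2)
  else b

-- ===== PRECONDITION & SPEC =====
def Spec_transform_bounding_box (bbox : Int × Int × Int × Int) (shape : Int × Int) (k : Int) (axis : Int) (out : Int × Int × Int × Int) : Prop := out = transform_bounding_box_alt bbox shape k axis
instance (bbox : Int × Int × Int × Int) (shape : Int × Int) (k : Int) (axis : Int) (out : Int × Int × Int × Int) : Decidable (Spec_transform_bounding_box bbox shape k axis out) := by unfold Spec_transform_bounding_box; infer_instance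

-- ===== CLAIM (what is proved, stated in full; the proofs are below) =====
def Claim_equal_transform_bounding_box : Prop := ∀ (bbox : Int × Int × Int × Int) (shape : Int × Int) (k : Int) (axis : Int), Dom_transform_bounding_box bbox shape k axis → Spec_transform_bounding_box bbox shape k axis (transform_bounding_box bbox shape k axis)

-- ===== LEMMAS AND PROOFS =====

-- four rotation steps are the identity
theorem tbbStep_four (s : (Int × Int × Int × Int) × Int × Int) :
    tbbStep (tbbStep (tbbStep (tbbStep s))) = s := by
  obtain ⟨⟨x, y, X, Y⟩, h, w⟩ := s
  simp [tbbStep]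

theorem tbbLoop_add_four (n : Nat) (s : (Int × Int × Int × Int) × Int × Int) :
    tbbLoop (n + 4) s = tbbLoop n s := by
  show tbbLoop n (tbbStep (tbbStep (tbbStep (tbbStep s)))) = tbbLoop n s
  rw [tbbStep_four]

theorem tbbLoop_mod (n : Nat) (s : (Int × Int × Int × Int) × Int × Int) :
    tbbLoop n s = tbbLoop (n % 4) s := by
  induction n using Nat.strong_induction_on with
  | _ n ih =>
    by_cases h4 : n < 4
    · rw [Nat.mod_eq_of_lt h4]
    · have : n = (n - 4) + 4 := by omega
      rw [this, tbbLoop_add_four, ih (n - 4) (by omega)]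
      congr 1
      omega

theorem tbbLoop_one (s : (Int × Int × Int × Int) × Int × Int) : tbbLoop 1 s = tbbStep s := rfl
theorem tbbLoop_two (s : (Int × Int × Int × Int) × Int × Int) : tbbLoop 2 s = tbbStep (tbbStep s) := rfl
theorem tbbLoop_three (s : (Int × Int × Int × Int) × Int × Int) : tbbLoop 3 s = tbbStep (tbbStep (tbbStep s)) := rfl

-- ===== VERDICT (by name: the statement is the Claim_ definition above) =====
theorem transform_bounding_box_spec : Claim_equal_transform_bounding_box := by
  intro ⟨x, y, X, Y⟩ ⟨h, w⟩ k axis _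
  show transform_bounding_box (x, y, X, Y) (h, w) k axis = transform_bounding_box_alt (x, y, X, Y) (h, w) k axis
  unfold transform_bounding_box transform_bounding_box_alt
  rw [tbbLoop_mod]
  by_cases hk : k > 0
  · have hk4 : k % 4 = 0 ∨ k % 4 = 1 ∨ k % 4 = 2 ∨ k % 4 = 3 := by omega
    rcases hk4 with h4 | h4 | h4 | h4
    · have hn : k.toNat % 4 = 0 := by omega
      rw [hn, h4]
      simp only [hk, if_true, tbbLoop]
      split_ifs <;> first
        | omega
        | simp
    · have hn : k.toNat % 4 = 1 := by omega
      rw [hn, h4]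
      simp only [hk, if_true, tbbLoop_one, tbbStep]
      split_ifs <;> first
        | omega
        | simp
    · have hn : k.toNat % 4 = 2 := by omega
      rw [hn, h4]
      simp only [hk, if_true, tbbLoop_two, tbbStep]
      split_ifs <;> first
        | omega
        | simp
    · have hn : k.toNat % 4 = 3 := by omega
      rw [hn, h4]
      simp only [hk, if_true, tbbLoop_three, tbbStep]
      split_ifs <;> first
        | omega
        | simp
  · have hn : k.toNat % 4 = 0 := by omega
    rw [hn]
    simp only [hk, if_false, tbbLoop]
    split_ifs <;> first
        | omega
        | simp
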